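-- pv_equiv track=rewrite | github.com/p8858xp/portfolio | python/assignment7/ParkPaul_assign7_part4.py | string_isupper
-- ===== SOURCE A (Python) =====
-- def string_isupper(word):
--     counter = 0
--     for x in word:
--         if ord(x) >=65 and ord(x) <=90:
--             counter += 1
--
--     if counter == len(word) and counter != 0:
--         return True
--     else:
--         return False
-- ===== SOURCE B (Python) =====
-- def string_isupper(word):
--     return bool(word) and 'A' <= min(word) and max(word) <= 'Z'
-- ===== Notes on version B (the rewrite author's own statement) =====
-- stated objective: simpler
-- what changed: Replaces the per-character counter-and-threshold loop with a nonempty guard plus min/max aggregate reductions, using contiguity of the uppercase ASCII range so both extremes in range implies all characters uppercase.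
import Mathlib
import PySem

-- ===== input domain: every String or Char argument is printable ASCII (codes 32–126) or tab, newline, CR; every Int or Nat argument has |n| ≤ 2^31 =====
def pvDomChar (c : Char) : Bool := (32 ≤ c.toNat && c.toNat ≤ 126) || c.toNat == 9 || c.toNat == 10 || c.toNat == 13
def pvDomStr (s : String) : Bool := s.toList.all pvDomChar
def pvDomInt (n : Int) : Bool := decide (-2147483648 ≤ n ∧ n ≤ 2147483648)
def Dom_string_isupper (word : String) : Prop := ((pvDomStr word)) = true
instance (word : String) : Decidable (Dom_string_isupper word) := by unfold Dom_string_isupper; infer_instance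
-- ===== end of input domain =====

-- B replaces A's counter-and-threshold loop by a nonempty guard plus min/max bound checks (objective: simpler).

-- ===== PORT A =====
def string_isupper (word : String) : Bool :=
  let counter : Int := word.toList.foldl
    (fun counter x =>
      if 65 ≤ (x.toNat : Int) ∧ (x.toNat : Int) ≤ 90 then counter + 1 else counter) 0
  if counter = (word.toList.length : Int) ∧ counter ≠ 0 then true else false

-- ===== PORT B =====
def string_isupper_alt (word : String) : Bool :=
  if word.toList.isEmpty then false
  else
    match PySem.List.min? word.toList (fun c => c), PySem.List.max? word.toList (fun c => c) with
    | some mn, some mx => decide ('A' ≤ mn) && decide (mx ≤ 'Z')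
    | _, _ => false

-- ===== PRECONDITION & SPEC =====
def Spec_string_isupper (word : String) (out : Bool) : Prop := out = string_isupper_alt word
instance (word : String) (out : Bool) : Decidable (Spec_string_isupper word out) := by unfold Spec_string_isupper; infer_instance

-- ===== CLAIM (what is proved, stated in full; the proofs are below) =====
def Claim_equal_string_isupper : Prop := ∀ (word : String), Dom_string_isupper word → Spec_string_isupper word (string_isupper word)

-- ===== LEMMAS AND PROOFS =====

def pvUpper (c : Char) : Prop := 'A' ≤ c ∧ c ≤ 'Z'

def pvP : Char → Bool := fun x => decide (65 ≤ (x.toNat : Int) ∧ (x.toNat : Int) ≤ 90)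

theorem pvUpper_iff (c : Char) : pvUpper c ↔ (65 ≤ (c.toNat : Int) ∧ (c.toNat : Int) ≤ 90) := by
  unfold pvUpper
  rw [Char.le_def, Char.le_def, UInt32.le_iff_toNat_le, UInt32.le_iff_toNat_le]
  have h1 : ('A' : Char).val.toNat = 65 := rfl
  have h2 : ('Z' : Char).val.toNat = 90 := rfl
  have h3 : Char.toNat c = c.val.toNat := rfl
  rw [h1, h2, h3]
  omega

theorem counter_eq_countP (l : List Char) (n : Int) :
    l.foldl (fun counter x =>
      if 65 ≤ (x.toNat : Int) ∧ (x.toNat : Int) ≤ 90 then counter + 1 else counter) n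
      = n + (l.countP pvP : Int) := by
  induction l generalizing n with
  | nil => simp
  | cons h t ih =>
    rw [List.foldl_cons, List.countP_cons, ih]
    by_cases hc : 65 ≤ (h.toNat : Int) ∧ (h.toNat : Int) ≤ 90
    · rw [if_pos hc, if_pos (by simpa [pvP] using hc)]
      push_cast; ring
    · rw [if_neg hc, if_neg (by simpa [pvP] using hc)]
      push_cast; ring

theorem portA_iff (word : String) :
    string_isupper word = true ↔ (word.toList ≠ [] ∧ ∀ c ∈ word.toList, pvUpper c) := by
  unfold string_isupper
  simp only [counter_eq_countP, zero_add]
  have hle : word.toList.countP pvP ≤ word.toList.length := List.countP_le_length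
  constructor
  · intro h
    by_cases hcond : ((word.toList.countP pvP : Int) = word.toList.length ∧
        (word.toList.countP pvP : Int) ≠ 0)
    · obtain ⟨heq, hne0⟩ := hcond
      have hlen : word.toList.countP pvP = word.toList.length := by exact_mod_cast heq
      have hall := List.countP_eq_length.mp hlen
      refine ⟨fun hnil => ?_, fun c hc => ?_⟩
      · rw [hnil] at hne0; simp at hne0
      · exact (pvUpper_iff c).mpr (by simpa [pvP] using hall c hc)
    · rw [if_neg hcond] at h; exact absurd h (by simp)
  · rintro ⟨hne, hall⟩
    have hlen : word.toList.countP pvP = word.toList.length := by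
      apply List.countP_eq_length.mpr
      intro c hc
      simpa [pvP] using (pvUpper_iff c).mp (hall c hc)
    have hpos : 0 < word.toList.length := List.length_pos_iff.mpr hne
    rw [if_pos ⟨by exact_mod_cast hlen, by rw [hlen]; exact_mod_cast hpos.ne'⟩]

theorem portB_iff (word : String) :
    string_isupper_alt word = true ↔ (word.toList ≠ [] ∧ ∀ c ∈ word.toList, pvUpper c) := by
  unfold string_isupper_alt
  by_cases he : word.toList = []
  · simp [he]
  · have hne : word.toList.isEmpty = false := by simpa using he
    rw [hne]
    cases hmn : PySem.List.min? word.toList (fun c => c) with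
    | none => exact absurd ((PySem.List.min?_eq_none_iff _ _).mp hmn) he
    | some mn =>
      cases hmx : PySem.List.max? word.toList (fun c => c) with
      | none => exact absurd ((PySem.List.max?_eq_none_iff _ _).mp hmx) he
      | some mx =>
        simp only [Bool.false_eq_true, if_false, Bool.and_eq_true, decide_eq_true_eq]
        have hmnmem : mn ∈ word.toList := PySem.List.min?_mem hmn
        have hmxmem : mx ∈ word.toList := PySem.List.max?_mem hmx
        constructor
        · rintro ⟨h1, h2⟩
          refine ⟨he, fun c hc => ?_⟩
          exact ⟨le_trans h1 (PySem.List.min?_isMin hmn c hc),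
                 le_trans (PySem.List.max?_isMax hmx c hc) h2⟩
        · rintro ⟨-, hall⟩
          exact ⟨(hall mn hmnmem).1, (hall mx hmxmem).2⟩

-- ===== VERDICT (by name: the statement is the Claim_ definition above) =====
theorem string_isupper_spec : Claim_equal_string_isupper := by
  intro word _
  unfold Spec_string_isupper
  by_cases h : word.toList ≠ [] ∧ ∀ c ∈ word.toList, pvUpper c
  · rw [portA_iff word |>.mpr h, portB_iff word |>.mpr h]
  · have ha := (not_iff_not.mpr (portA_iff word)).mpr h
    have hb := (not_iff_not.mpr (portB_iff word)).mpr h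
    simp only [Bool.not_eq_true] at ha hb
    rw [ha, hb]
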